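-- pv_equiv track=rewrite | github.com/jaySHKorea/Coding-Test | 2103-week1/bracketTransform.py | check
-- ===== SOURCE A (Python) =====
-- def check(string):
--     left_cnt = 0
--     right_cnt = 0
--     sList = list(string)
--
--     for s in sList:
--         if ( s == '('):
--             left_cnt += 1
--         else:
--             right_cnt += 1
--         if ( right_cnt > left_cnt):
--             return False
--     return True
-- ===== SOURCE B (Python) =====
-- def check(string):
--     # Position-pairing algorithm: the k-th closer must come after the k-th opener.
--     openers = [i for i, c in enumerate(string) if c == '(']
--     closers = [i for i, c in enumerate(string) if c != '(']
--     if len(closers) > len(openers):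
--         return False
--     return all(o < c for o, c in zip(openers, closers))
-- ===== Notes on version B (the rewrite author's own statement) =====
-- stated objective: alternative
-- what changed: Instead of scanning with running counters and an early exit, B collects the index lists of openers and closers and decides validity by position pairing: there are at least as many openers as closers and the k-th opener occurs before the k-th closer.
import Mathlib
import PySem

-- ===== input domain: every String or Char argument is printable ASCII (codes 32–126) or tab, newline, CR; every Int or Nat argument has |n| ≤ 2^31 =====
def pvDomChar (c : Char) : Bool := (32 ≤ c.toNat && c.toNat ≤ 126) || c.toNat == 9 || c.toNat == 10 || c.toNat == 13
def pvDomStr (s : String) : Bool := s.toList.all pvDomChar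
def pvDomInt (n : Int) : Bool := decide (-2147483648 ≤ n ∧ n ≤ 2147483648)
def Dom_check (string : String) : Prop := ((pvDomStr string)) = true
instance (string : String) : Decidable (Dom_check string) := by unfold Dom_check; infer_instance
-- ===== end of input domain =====

-- B replaces A's running-counter scan with position pairing: collect the index
-- lists of openers and closers and check that the k-th opener precedes the k-th closer.

-- ===== PORT A =====
-- the for-loop over the characters with the two counters and the early `return False`
def checkLoop : List Char → Int → Int → Bool
  | [], _, _ => true
  | s :: rest, left_cnt, right_cnt =>
      let left_cnt' := if s = '(' then left_cnt + 1 else left_cnt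
      let right_cnt' := if s = '(' then right_cnt else right_cnt + 1
      if right_cnt' > left_cnt' then false else checkLoop rest left_cnt' right_cnt'

def check (string : String) : Bool := checkLoop string.toList 0 0

-- ===== PORT B =====
def check_alt (string : String) : Bool :=
  let openers := ((PySem.List.enumerate string.toList 0).filter (fun p => p.2 == '(')).map (fun p => p.1)
  let closers := ((PySem.List.enumerate string.toList 0).filter (fun p => p.2 != '(')).map (fun p => p.1)
  if closers.length > openers.length then false
  else (openers.zip closers).all (fun p => decide (p.1 < p.2))

-- ===== PRECONDITION & SPEC =====
def Spec_check (string : String) (out : Bool) : Prop := out = check_alt string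
instance (string : String) (out : Bool) : Decidable (Spec_check string out) := by unfold Spec_check; infer_instance

-- ===== CLAIM (what is proved, stated in full; the proofs are below) =====
def Claim_equal_check : Prop := ∀ (string : String), Dom_check string → Spec_check string (check string)

-- ===== LEMMAS AND PROOFS =====
def opens (n : Int) (cs : List Char) : List Int :=
  ((PySem.List.enumerate cs n).filter (fun p => p.2 == '(')).map (fun p => p.1)
def closes (n : Int) (cs : List Char) : List Int :=
  ((PySem.List.enumerate cs n).filter (fun p => p.2 != '(')).map (fun p => p.1)

theorem opens_cons (n : Int) (c : Char) (cs : List Char) :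
    opens n (c :: cs) = if c = '(' then n :: opens (n + 1) cs else opens (n + 1) cs := by
  by_cases h : c = '(' <;> simp [opens, PySem.List.enumerate_cons, h]

theorem closes_cons (n : Int) (c : Char) (cs : List Char) :
    closes n (c :: cs) = if c = '(' then closes (n + 1) cs else n :: closes (n + 1) cs := by
  by_cases h : c = '(' <;> simp [closes, PySem.List.enumerate_cons, h]

theorem mem_opens_ge (cs : List Char) : ∀ (n x : Int), x ∈ opens n cs → n ≤ x := by
  induction cs with
  | nil => intro n x hx; simp [opens, PySem.List.enumerate_nil] at hx
  | cons c rest ih =>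
      intro n x hx
      rw [opens_cons] at hx
      by_cases h : c = '('
      · rw [if_pos h] at hx
        rcases List.mem_cons.mp hx with h1 | h1
        · omega
        · have := ih (n + 1) x h1; omega
      · rw [if_neg h] at hx
        have := ih (n + 1) x hx; omega

theorem mem_closes_ge (cs : List Char) : ∀ (n x : Int), x ∈ closes n cs → n ≤ x := by
  induction cs with
  | nil => intro n x hx; simp [closes, PySem.List.enumerate_nil] at hx
  | cons c rest ih =>
      intro n x hx
      rw [closes_cons] at hx
      by_cases h : c = '('
      · rw [if_pos h] at hx
        have := ih (n + 1) x hx; omega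
      · rw [if_neg h] at hx
        rcases List.mem_cons.mp hx with h1 | h1
        · omega
        · have := ih (n + 1) x h1; omega

-- A's loop depends only on the difference of the two counters.
theorem checkLoop_shift (cs : List Char) : ∀ (l r : Int),
    checkLoop cs l r = checkLoop cs (l - r) 0 := by
  induction cs with
  | nil => intro l r; rfl
  | cons c rest ih =>
      intro l r
      by_cases hc : c = '('
      · simp only [checkLoop, hc, if_true]
        have h1 : (r > l + 1) ↔ ((0 : Int) > l - r + 1) := by omega
        by_cases h : r > l + 1
        · rw [if_pos h, if_pos (h1.mp h)]
        · rw [if_neg h, if_neg (fun hh => h (h1.mpr hh)), ih (l + 1) r, ih (l - r + 1) 0]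
          norm_num
          congr 1
          omega
      · simp only [checkLoop, hc, if_false]
        have h1 : (r + 1 > l) ↔ ((0 : Int) + 1 > l - r) := by omega
        by_cases h : r + 1 > l
        · rw [if_pos h, if_pos (h1.mp h)]
        · rw [if_neg h, if_neg (fun hh => h (h1.mpr hh)), ih l (r + 1), ih (l - r) (0 + 1)]
          congr 1
          omega

-- Main invariant: with a surplus of d unmatched openers before the suffix, A's loop
-- succeeds iff the closers of the suffix beyond the first d pair up with later openers.
theorem checkLoop_eq_pairing (cs : List Char) : ∀ (n : Int) (d : Nat),
    checkLoop cs (d : Int) 0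
      = (decide ((closes n cs).length ≤ d + (opens n cs).length)
          && ((opens n cs).zip ((closes n cs).drop d)).all (fun p => decide (p.1 < p.2))) := by
  induction cs with
  | nil =>
      intro n d
      simp [checkLoop, opens, closes, PySem.List.enumerate_nil]
  | cons c rest ih =>
      intro n d
      by_cases hc : c = '('
      · -- opener: surplus grows to d+1
        rw [opens_cons, closes_cons, if_pos hc, if_pos hc]
        have hno : ¬ ((0 : Int) > (d : Int) + 1) := by omega
        simp only [checkLoop, hc, if_true, if_neg hno]
        have hcast : ((d : Int) + 1) = ((d + 1 : Nat) : Int) := by push_cast; ring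
        rw [hcast, ih (n + 1) (d + 1)]
        rcases hdrop : (closes (n + 1) rest).drop d with _ | ⟨x, xs⟩
        · have h2 : (closes (n + 1) rest).drop (d + 1) = ([] : List Int) := by
            rw [← List.drop_drop]; simp [hdrop]
          rw [h2]
          simp only [List.zip_nil_right, List.all_nil, Bool.and_true, List.length_cons,
            decide_eq_decide]
          omega
        · have h2 : (closes (n + 1) rest).drop (d + 1) = xs := by
            rw [← List.drop_drop]; simp [hdrop]
          have hx : n < x := by
            have hxm : x ∈ closes (n + 1) rest := by
              have : x ∈ (closes (n + 1) rest).drop d := by rw [hdrop]; exact List.mem_cons_self ..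
              exact List.mem_of_mem_drop this
            have := mem_closes_ge rest (n + 1) x hxm; omega
          rw [h2]
          simp only [List.zip_cons_cons, List.all_cons, hx, decide_true, Bool.true_and]
          congr 1
          simp only [decide_eq_decide, List.length_cons]
          omega
      · -- closer
        rw [opens_cons, closes_cons, if_neg hc, if_neg hc]
        simp only [checkLoop, hc, if_false]
        rcases d with _ | d
        · -- no surplus: A fails; B's pairing fails too
          have : ((0 : Int) + 1 > (0 : Nat)) := by norm_num
          rw [if_pos this]
          rcases hop : opens (n + 1) rest with _ | ⟨o, os⟩
          · simp
          · have ho : n < o := by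
              have := mem_opens_ge rest (n + 1) o (by rw [hop]; exact List.mem_cons_self ..)
              omega
            have hno : ¬ (o < n) := by omega
            simp [hno]
        · -- surplus d+1: consume one closer
          have hno : ¬ ((0 : Int) + 1 > ((d + 1 : Nat) : Int)) := by push_cast; omega
          rw [if_neg hno, checkLoop_shift rest ((d + 1 : Nat) : Int) (0 + 1)]
          have hcast : ((d + 1 : Nat) : Int) - (0 + 1) = ((d : Nat) : Int) := by push_cast; ring
          rw [hcast, ih (n + 1) d]
          simp only [List.length_cons, List.drop_succ_cons]
          congr 1
          simp only [decide_eq_decide]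
          omega

-- ===== VERDICT (by name: the statement is the Claim_ definition above) =====
theorem check_alt_eq (string : String) :
    check_alt string
      = (if (closes 0 string.toList).length > (opens 0 string.toList).length then false
          else ((opens 0 string.toList).zip (closes 0 string.toList)).all
            (fun p => decide (p.1 < p.2))) := rfl

theorem check_spec : Claim_equal_check := by
  intro string _
  unfold Spec_check check
  rw [check_alt_eq]
  have h00 := checkLoop_eq_pairing string.toList 0 0
  norm_num at h00
  rw [h00]
  by_cases h : (closes 0 string.toList).length ≤ (opens 0 string.toList).length
  · rw [if_neg (by omega)]
    simp [h]
  · rw [if_pos (by omega)]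
    simp [h]
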